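-- pv_equiv track=rewrite | github.com/bbilgun/Algolab | lab10/lab10-1.py | aggregate_cost
-- ===== SOURCE A (Python) =====
-- def aggregate_cost(n):
--     total_cost = 0
--
--     for i in range(1, n + 1):
--         if (i & (i - 1)) == 0:
--             total_cost += i
--         else:
--             total_cost += 1
--
--     return total_cost
--
-- n = 16
-- ===== SOURCE B (Python) =====
-- def aggregate_cost(n):
--     # Closed-form by contribution: every i in 1..n contributes at least 1 (n total),
--     # and each power of two p <= n contributes p instead of 1 (extra p - 1).
--     if n < 1:
--         return 0
--     total = n
--     p = 1
--     while p <= n: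
--         total += p - 1
--         p *= 2
--     return total
-- ===== Notes on version B (the rewrite author's own statement) =====
-- stated objective: faster
-- what changed: Replaces the O(n) loop over every i with a contribution argument: start from n (each i adds at least 1) and add p-1 for each power of two p <= n, an O(log n) doubling loop.
import Mathlib
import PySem

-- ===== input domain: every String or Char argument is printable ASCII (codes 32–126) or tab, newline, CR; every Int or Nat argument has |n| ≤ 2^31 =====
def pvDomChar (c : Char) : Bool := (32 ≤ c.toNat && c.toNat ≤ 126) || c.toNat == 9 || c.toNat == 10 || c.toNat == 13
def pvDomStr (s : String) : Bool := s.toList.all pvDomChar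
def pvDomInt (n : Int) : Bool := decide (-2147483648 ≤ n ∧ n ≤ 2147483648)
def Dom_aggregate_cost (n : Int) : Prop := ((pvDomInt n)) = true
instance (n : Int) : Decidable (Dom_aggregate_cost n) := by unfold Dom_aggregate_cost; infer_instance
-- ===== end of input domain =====

-- B replaces A's O(n) per-element loop by an O(log n) contribution count: total = n plus
-- (p - 1) for each power of two p ≤ n (objective: faster, asymptotic).

-- ===== PORT A =====
def aggregate_cost (n : Int) : Int :=
  (PySem.List.pyRange 1 (n + 1)).foldl
    (fun total i => if PySem.Int.band i (i - 1) == 0 then total + i else total + 1) 0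

-- ===== PORT B =====
-- the 'while p <= n: total += p - 1; p *= 2' loop of Source B; the '1 ≤ p' conjunct is a
-- totality guard (p starts at 1 and doubles, so it always holds at every call site)
def aggGoB (p n : Nat) : Int :=
  if 1 ≤ p ∧ p ≤ n then ((p : Int) - 1) + aggGoB (2 * p) n else 0
termination_by n + 1 - p
decreasing_by omega

def aggregate_cost_alt (n : Int) : Int :=
  if n < 1 then 0 else n + aggGoB 1 n.toNat

-- ===== PRECONDITION & SPEC =====
def Spec_aggregate_cost (n : Int) (out : Int) : Prop := out = aggregate_cost_alt n
instance (n : Int) (out : Int) : Decidable (Spec_aggregate_cost n out) := by unfold Spec_aggregate_cost; infer_instance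

-- ===== CLAIM (what is proved, stated in full; the proofs are below) =====
def Claim_equal_aggregate_cost : Prop := ∀ (n : Int), Dom_aggregate_cost n → Spec_aggregate_cost n (aggregate_cost n)

-- ===== LEMMAS AND PROOFS =====

-- n & (n-1) == 0 tests "n is a power of two" (for n ≥ 1)
theorem land_pred_eq_zero_iff (n : Nat) :
    ∀ _ : 1 ≤ n, ((n &&& (n - 1)) = 0 ↔ ∃ j, n = 2 ^ j) := by
  induction n using Nat.strong_induction_on with
  | _ n ih =>
    intro h1
    rcases Nat.even_or_odd n with he | ho
    · obtain ⟨m, hm⟩ := he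
      have hm1 : 1 ≤ m := by omega
      have e1 : n = Nat.bit false m := by simp [Nat.bit]; omega
      have e2 : n - 1 = Nat.bit true (m - 1) := by simp [Nat.bit]; omega
      have hbit : n &&& (n - 1) = 2 * (m &&& (m - 1)) := by
        rw [e2, e1, Nat.land_bit]; simp [Nat.bit]
      constructor
      · intro h0
        have hz : m &&& (m - 1) = 0 := by omega
        obtain ⟨j, hj⟩ := (ih m (by omega) hm1).mp hz
        exact ⟨j + 1, by rw [pow_succ]; omega⟩
      · rintro ⟨j, hj⟩
        cases j with
        | zero => simp at hj; omega
        | succ j' =>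
          have hmj : m = 2 ^ j' := by rw [pow_succ] at hj; omega
          have := (ih m (by omega) hm1).mpr ⟨j', hmj⟩
          omega
    · obtain ⟨m, hm⟩ := ho
      by_cases hm0 : m = 0
      · subst hm0
        have : n = 1 := by omega
        subst this
        exact ⟨fun _ => ⟨0, rfl⟩, fun _ => by decide⟩
      · have e1 : n = Nat.bit true m := by simp [Nat.bit]; omega
        have e2 : n - 1 = Nat.bit false m := by simp [Nat.bit]; omega
        have hbit : n &&& (n - 1) = 2 * m := by
          rw [e2, e1, Nat.land_bit]; simp [Nat.bit]
        constructor
        · intro h0; omega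
        · rintro ⟨j, hj⟩
          cases j with
          | zero => omega
          | succ j' => rw [pow_succ] at hj; omega

theorem aggregate_cost_zero : aggregate_cost 0 = 0 := by
  simp [aggregate_cost]

theorem aggregate_cost_succ (m : Nat) :
    aggregate_cost ((m : Int) + 1) =
      aggregate_cost (m : Int) +
        (if ((m + 1) &&& m) = 0 then ((m : Int) + 1) else 1) := by
  unfold aggregate_cost
  rw [PySem.List.pyRange_one_succ_right (by omega : (1 : Int) ≤ (m : Int) + 1),
      List.foldl_append]
  have hb : PySem.Int.band ((m : Int) + 1) ((m : Nat) : Int)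
      = (((m + 1) &&& m : Nat) : Int) := by
    have := PySem.Int.band_natCast (m + 1) m
    push_cast at this ⊢
    rw [this]
  by_cases hc : ((m + 1) &&& m) = 0
  · simp [List.foldl, hb, hc]
  · simp [List.foldl, hb, hc]

theorem aggGoB_stop (p n : Nat) (h : ¬ (1 ≤ p ∧ p ≤ n)) : aggGoB p n = 0 := by
  rw [aggGoB, if_neg h]

theorem aggGoB_step (p n : Nat) (h : 1 ≤ p ∧ p ≤ n) :
    aggGoB p n = ((p : Int) - 1) + aggGoB (2 * p) n := by
  rw [aggGoB, if_pos h]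

theorem alt_nat (m : Nat) : aggregate_cost_alt (m : Int) = (m : Int) + aggGoB 1 m := by
  unfold aggregate_cost_alt
  by_cases h : (m : Int) < 1
  · have hm : m = 0 := by omega
    subst hm
    simp [aggGoB_stop 1 0 (by omega)]
  · rw [if_neg h, Int.toNat_natCast]

theorem go_succ_aux : ∀ (k p m : Nat), m + 2 - p ≤ k → 1 ≤ p →
    ((∃ j, m + 1 = p * 2 ^ j) → aggGoB p (m + 1) = aggGoB p m + (m : Int)) ∧
    (¬ (∃ j, m + 1 = p * 2 ^ j) → aggGoB p (m + 1) = aggGoB p m) := by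
  intro k
  induction k with
  | zero =>
    intro p m hk hp
    have hc : ¬ ∃ j, m + 1 = p * 2 ^ j := by
      rintro ⟨j, hj⟩
      have : p ≤ p * 2 ^ j := Nat.le_mul_of_pos_right _ (Nat.two_pow_pos j)
      omega
    refine ⟨fun h => absurd h hc, fun _ => ?_⟩
    rw [aggGoB_stop p (m + 1) (by omega), aggGoB_stop p m (by omega)]
  | succ K ih =>
    intro p m hk hp
    by_cases hpm : p ≤ m
    · have hrec := ih (2 * p) m (by omega) (by omega)
      have hcond : (∃ j, m + 1 = p * 2 ^ j) ↔ (∃ j, m + 1 = 2 * p * 2 ^ j) := by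
        constructor
        · rintro ⟨j, hj⟩
          cases j with
          | zero => simp at hj; omega
          | succ j' => exact ⟨j', by rw [hj, pow_succ]; ring⟩
        · rintro ⟨j, hj⟩
          exact ⟨j + 1, by rw [hj, pow_succ]; ring⟩
      have e1 := aggGoB_step p (m + 1) ⟨hp, by omega⟩
      have e2 := aggGoB_step p m ⟨hp, hpm⟩
      constructor
      · intro hc
        rw [e1, e2, hrec.1 (hcond.mp hc)]
        ring
      · intro hc
        rw [e1, e2, hrec.2 (fun h => hc (hcond.mpr h))]
    · by_cases hpe : p = m + 1
      · subst hpe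
        have e1 : aggGoB (m + 1) (m + 1) = (m : Int) := by
          rw [aggGoB_step (m + 1) (m + 1) ⟨by omega, le_rfl⟩,
              aggGoB_stop (2 * (m + 1)) (m + 1) (by omega)]
          push_cast
          ring
        refine ⟨fun _ => ?_, fun hc => absurd ⟨0, by simp⟩ hc⟩
        rw [e1, aggGoB_stop (m + 1) m (by omega)]
        ring
      · have hc : ¬ ∃ j, m + 1 = p * 2 ^ j := by
          rintro ⟨j, hj⟩
          have : p ≤ p * 2 ^ j := Nat.le_mul_of_pos_right _ (Nat.two_pow_pos j)
          omega
        refine ⟨fun h => absurd h hc, fun _ => ?_⟩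
        rw [aggGoB_stop p (m + 1) (by omega), aggGoB_stop p m (by omega)]

theorem main_nat (m : Nat) : aggregate_cost (m : Int) = (m : Int) + aggGoB 1 m := by
  induction m with
  | zero => simp [aggregate_cost_zero, aggGoB_stop 1 0 (by omega)]
  | succ m ih =>
    have hstep := aggregate_cost_succ m
    have hgo := go_succ_aux (m + 2) 1 m (by omega) (by omega)
    have hpow : (∃ j, m + 1 = 1 * 2 ^ j) ↔ (∃ j, m + 1 = 2 ^ j) := by simp
    have hland := land_pred_eq_zero_iff (m + 1) (by omega)
    have hm1 : m + 1 - 1 = m := by omega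
    rw [hm1] at hland
    push_cast
    rw [hstep, ih]
    by_cases hc : ∃ j, m + 1 = 2 ^ j
    · rw [if_pos (hland.mpr hc), hgo.1 (hpow.mpr hc)]; ring
    · rw [if_neg (fun h => hc (hland.mp h)), hgo.2 (fun h => hc (hpow.mp h))]; ring

theorem aggregate_cost_nonpos (n : Int) (h : n < 1) : aggregate_cost n = 0 := by
  unfold aggregate_cost
  simp [PySem.List.pyRange_one, Int.toNat_of_nonpos (by omega : n ≤ 0)]

-- ===== VERDICT (by name: the statement is the Claim_ definition above) =====
theorem aggregate_cost_spec : Claim_equal_aggregate_cost := by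
  intro n _
  unfold Spec_aggregate_cost
  by_cases h : n < 1
  · rw [aggregate_cost_nonpos n h]
    unfold aggregate_cost_alt
    rw [if_pos h]
  · have hn : n = ((n.toNat : Nat) : Int) := by omega
    rw [hn, main_nat, alt_nat]
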